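-- pv_equiv track=rewrite | github.com/CianLR/judge-solutions | leetcode/minimum_height_trees.py | bfs_furthest_node
-- ===== SOURCE A (Python) =====
-- from collections import deque
--
-- def bfs_furthest_node(n, adj, start):
--     prev = [None] * n
--     prev[start] = start
--     q = deque([(1, start)])
--     u, d = None, None
--     while q:
--         d, u = q.popleft()
--         for v in adj[u]:
--             if prev[v] is None:
--                 prev[v] = u
--                 q.append((d + 1, v))
--     return u, d, prev
-- ===== SOURCE B (Python) =====
-- def bfs_furthest_node(n, adj, start):
--     prev = [None] * n
--     prev[start] = start
--     frontier = [start]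
--     d = 1
--     u = start
--     while frontier:
--         nxt = []
--         for node in frontier:
--             u = node
--             for v in adj[node]:
--                 if prev[v] is None:
--                     prev[v] = node
--                     nxt.append(v)
--         if nxt:
--             d += 1
--         frontier = nxt
--     return u, d, prev
-- ===== Notes on version B (the rewrite author's own statement) =====
-- stated objective: alternative
-- what changed: Level-synchronous BFS: a frontier list rebuilt level by level with a single level counter replaces the FIFO deque of (distance, node) pairs; the last node of the last level and the count of non-empty levels reproduce A's final u and d.
-- outside the precondition, e.g. on bfs_furthest_node(2, [[1], [0], [5]], 0): A returns (1, 2, [0, 0]), B returns (1, 2, [0, 0]); on bfs_furthest_node(1, [[0], [7]], 0): A returns (0, 1, [0]), B returns (0, 1, [0])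
import Mathlib
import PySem

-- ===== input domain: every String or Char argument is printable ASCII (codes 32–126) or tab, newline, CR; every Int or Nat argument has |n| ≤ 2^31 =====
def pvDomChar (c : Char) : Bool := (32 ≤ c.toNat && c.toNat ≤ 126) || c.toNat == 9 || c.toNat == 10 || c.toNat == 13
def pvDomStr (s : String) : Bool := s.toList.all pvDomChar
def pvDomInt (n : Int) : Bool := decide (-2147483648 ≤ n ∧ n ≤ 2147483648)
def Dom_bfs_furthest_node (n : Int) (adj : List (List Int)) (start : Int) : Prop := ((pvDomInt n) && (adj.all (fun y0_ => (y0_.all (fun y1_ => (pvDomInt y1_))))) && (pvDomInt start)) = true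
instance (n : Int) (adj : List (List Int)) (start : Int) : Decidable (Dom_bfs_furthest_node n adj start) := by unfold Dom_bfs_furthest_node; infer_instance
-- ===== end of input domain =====

-- B replaces A's deque of (distance, node) pairs by a level-synchronous frontier with a single
-- level counter; return values are proved equal on Pre_ (start and all adjacency entries are
-- valid Python indices into prev and adj, negative values wrapping).

-- ===== PORT A =====
-- number of unvisited (none) entries; used only by the totality guards of the loops
def cnPrev (prev : List (Option Int)) : Nat := prev.countP (fun o => o = none)

-- Python list indexing for an index that is in range (negative values wrap); used by both ports
def pyidx (len : Nat) (i : Int) : Nat := (if i < 0 then i + len else i).toNat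

-- inner 'for v in adj[u]' of A: mark unvisited neighbours and append (d+1, v) to the queue
def foldA (node d : Int) (row : List Int) (prev : List (Option Int)) (q : List (Int × Int)) :
    List (Option Int) × List (Int × Int) :=
  match row with
  | [] => (prev, q)
  | v :: vs =>
      if prev.getD (pyidx prev.length v) none = none then
        foldA node d vs (prev.set (pyidx prev.length v) (some node)) (q ++ [(d + 1, v)])
      else foldA node d vs prev q

-- A's 'while q' loop; the dite is only a totality guard (inside Pre_ the measure always drops)
def loopA (adj : List (List Int)) (prev : List (Option Int)) (q : List (Int × Int))
    (u d : Int) : Int × Int × List (Option Int) :=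
  match q with
  | [] => (u, d, prev)
  | (d', u') :: q' =>
      if _h : cnPrev (foldA u' d' (adj.getD (pyidx adj.length u') []) prev q').1
            + (foldA u' d' (adj.getD (pyidx adj.length u') []) prev q').2.length
            < cnPrev prev + q'.length + 1 then
        loopA adj (foldA u' d' (adj.getD (pyidx adj.length u') []) prev q').1
          (foldA u' d' (adj.getD (pyidx adj.length u') []) prev q').2 u' d'
      else (u', d', (foldA u' d' (adj.getD (pyidx adj.length u') []) prev q').1)
termination_by cnPrev prev + q.length
decreasing_by simp only [List.length_cons]; omega

-- Python initialises u, d = None, None, but the queue starts non-empty so the first pop always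
-- overwrites them; we initialise them with that first pop's values (1, start), which is identical.
def bfs_furthest_node (n : Int) (adj : List (List Int)) (start : Int) :
    Int × Int × List (Option Int) :=
  let prev := (List.replicate n.toNat (none : Option Int)).set (pyidx n.toNat start) (some start)
  loopA adj prev [(1, start)] start 1

-- ===== PORT B =====
-- inner 'for v in adj[node]' of B: mark unvisited neighbours and append v to nxt
def foldB (node : Int) (row : List Int) (prev : List (Option Int)) (nxt : List Int) :
    List (Option Int) × List Int :=
  match row with
  | [] => (prev, nxt)
  | v :: vs =>
      if prev.getD (pyidx prev.length v) none = none then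
        foldB node vs (prev.set (pyidx prev.length v) (some node)) (nxt ++ [v])
      else foldB node vs prev nxt

-- B's 'for node in frontier' pass building the next level (and tracking u)
def levelB (adj : List (List Int)) (frontier : List Int) (prev : List (Option Int))
    (nxt : List Int) (u : Int) : List (Option Int) × List Int × Int :=
  match frontier with
  | [] => (prev, nxt, u)
  | node :: rest =>
      let t := foldB node (adj.getD (pyidx adj.length node) []) prev nxt
      levelB adj rest t.1 t.2 node

-- B's 'while frontier' loop; the dite is only a totality guard (a non-empty next level marks a
-- node inside Pre_, and for an empty next level the early return equals the next iteration)
def loopB (adj : List (List Int)) (prev : List (Option Int)) (frontier : List Int)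
    (d u : Int) : Int × Int × List (Option Int) :=
  match frontier with
  | [] => (u, d, prev)
  | node :: rest =>
      if h : cnPrev (levelB adj (node :: rest) prev [] u).1 < cnPrev prev then
        loopB adj (levelB adj (node :: rest) prev [] u).1
          (levelB adj (node :: rest) prev [] u).2.1
          (if (levelB adj (node :: rest) prev [] u).2.1 = [] then d else d + 1)
          (levelB adj (node :: rest) prev [] u).2.2
      else ((levelB adj (node :: rest) prev [] u).2.2,
            (if (levelB adj (node :: rest) prev [] u).2.1 = [] then d else d + 1),
            (levelB adj (node :: rest) prev [] u).1)
termination_by cnPrev prev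
decreasing_by exact h

def bfs_furthest_node_alt (n : Int) (adj : List (List Int)) (start : Int) :
    Int × Int × List (Option Int) :=
  let prev := (List.replicate n.toNat (none : Option Int)).set (pyidx n.toNat start) (some start)
  loopB adj prev [start] 1 start

-- ===== PRECONDITION & SPEC =====
-- Pre_ requires start and every adjacency entry to be a valid Python index (negative values wrap)
-- into both prev (length n) and adj; A also returns on graphs whose invalid entries are merely
-- unreachable from start, which a closed-form condition cannot capture without re-simulating the
-- BFS (B returns the same values there in Python; the ports are only claimed on Pre_).
def Pre_bfs_furthest_node (n : Int) (adj : List (List Int)) (start : Int) : Prop :=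
  0 < n ∧ (-n ≤ start ∧ start < n) ∧
    (-(adj.length : Int) ≤ start ∧ start < adj.length) ∧
    ∀ row ∈ adj, ∀ v ∈ row,
      (-n ≤ v ∧ v < n) ∧ (-(adj.length : Int) ≤ v ∧ v < adj.length)
instance (n : Int) (adj : List (List Int)) (start : Int) :
    Decidable (Pre_bfs_furthest_node n adj start) := by
  unfold Pre_bfs_furthest_node; infer_instance

def pvWitness_bfs_furthest_node : Int × List (List Int) × Int := (3, [[1], [0, 2], [1]], 0)

def Spec_bfs_furthest_node (n : Int) (adj : List (List Int)) (start : Int)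
    (out : Int × Int × List (Option Int)) : Prop := out = bfs_furthest_node_alt n adj start
instance (n : Int) (adj : List (List Int)) (start : Int) (out : Int × Int × List (Option Int)) :
    Decidable (Spec_bfs_furthest_node n adj start out) := by
  unfold Spec_bfs_furthest_node; infer_instance

-- ===== CLAIM (what is proved, stated in full; the proofs are below) =====
def Claim_equal_bfs_furthest_node : Prop := ∀ (n : Int) (adj : List (List Int)) (start : Int), Dom_bfs_furthest_node n adj start → Pre_bfs_furthest_node n adj start → Spec_bfs_furthest_node n adj start (bfs_furthest_node n adj start)

-- ===== LEMMAS AND PROOFS =====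

-- setting an unvisited in-range entry removes exactly one 'none'
theorem cn_set (prev : List (Option Int)) (i : Nat) (x : Int)
    (hi : i < prev.length) (hn : prev.getD i none = none) :
    cnPrev (prev.set i (some x)) + 1 = cnPrev prev := by
  induction prev generalizing i with
  | nil => simp at hi
  | cons a t ih =>
      cases i with
      | zero =>
          have : a = none := by simpa using hn
          subst this
          simp [cnPrev]
      | succ j =>
          have := ih j (by simpa using hi) (by simpa using hn)
          simp only [List.set_cons_succ, cnPrev, List.countP_cons] at this ⊢
          omega

-- the A-side inner fold is the B-side inner fold with the (d+1, ·)-tagged queue suffix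
theorem foldA_eq_foldB (node d : Int) (row : List Int) :
    ∀ (prev : List (Option Int)) (C : List (Int × Int)) (nxt : List Int),
      foldA node d row prev (C ++ nxt.map (fun v => (d + 1, v)))
        = ((foldB node row prev nxt).1,
           C ++ (foldB node row prev nxt).2.map (fun v => (d + 1, v))) := by
  induction row with
  | nil => intro prev C nxt; simp [foldA, foldB]
  | cons v vs ih =>
      intro prev C nxt
      by_cases h : prev.getD (pyidx prev.length v) none = none
      · have e : C ++ nxt.map (fun v => (d + 1, v)) ++ [(d + 1, v)]
            = C ++ (nxt ++ [v]).map (fun v => (d + 1, v)) := by simp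
        simp only [foldA, foldB, if_pos h]
        rw [e, ih]
      · simp only [foldA, foldB, if_neg h, ih]

-- an in-range Python index normalises below the length
theorem pyidx_lt (m : Nat) (v : Int) (h1 : -(m : Int) ≤ v) (h2 : v < m) : pyidx m v < m := by
  unfold pyidx; split <;> omega

-- accounting for one inner fold: marks balance the appended nodes, length is preserved,
-- and every appended node comes from nxt or row
theorem foldB_inv (node : Int) (row : List Int) :
    ∀ (prev : List (Option Int)) (nxt : List Int),
      (∀ v ∈ row, pyidx prev.length v < prev.length) →
      cnPrev (foldB node row prev nxt).1 + (foldB node row prev nxt).2.length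
          = cnPrev prev + nxt.length
      ∧ (foldB node row prev nxt).1.length = prev.length
      ∧ ∀ v ∈ (foldB node row prev nxt).2, v ∈ nxt ∨ v ∈ row := by
  induction row with
  | nil => intro prev nxt _; simp [foldB]
  | cons w ws ih =>
      intro prev nxt hr
      have hw := hr w (by simp)
      by_cases h : prev.getD (pyidx prev.length w) none = none
      · simp only [foldB, if_pos h]
        have hlen : (prev.set (pyidx prev.length w) (some node)).length = prev.length := by simp
        have hr' : ∀ v ∈ ws,
            pyidx (prev.set (pyidx prev.length w) (some node)).length v
              < (prev.set (pyidx prev.length w) (some node)).length := by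
          intro v hv; have := hr v (by simp [hv]); simpa [hlen] using this
        obtain ⟨h1, h2, h3⟩ := ih (prev.set (pyidx prev.length w) (some node)) (nxt ++ [w]) hr'
        have hcn := cn_set prev (pyidx prev.length w) node hw h
        refine ⟨by simp at h1 ⊢; omega, by rw [h2, hlen], ?_⟩
        intro v hv
        rcases h3 v hv with hv' | hv'
        · rcases List.mem_append.1 hv' with hv'' | hv''
          · exact Or.inl hv''
          · simp at hv''; subst hv''; exact Or.inr (by simp)
        · exact Or.inr (by simp [hv'])
      · simp only [foldB, if_neg h]
        obtain ⟨h1, h2, h3⟩ := ih prev nxt (fun v hv => hr v (by simp [hv]))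
        exact ⟨h1, h2, fun v hv => (h3 v hv).imp id (fun h => by simp [h])⟩

-- processing one whole level: A's queue walk over the d-tagged frontier equals B's level pass
theorem loopA_level (adj : List (List Int)) (n : Int)
    (hn : 0 < n)
    (HA : ∀ row ∈ adj, ∀ v ∈ row, (-n ≤ v ∧ v < n) ∧ (-(adj.length : Int) ≤ v ∧ v < adj.length)) :
    ∀ (front : List Int) (prev : List (Option Int)) (nxt : List Int) (u0 d0 d : Int),
      prev.length = n.toNat →
      (∀ v ∈ front, (-n ≤ v ∧ v < n) ∧ (-(adj.length : Int) ≤ v ∧ v < adj.length)) →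
      loopA adj prev (front.map (fun v => (d, v)) ++ nxt.map (fun v => (d + 1, v))) u0 d0
        = loopA adj (levelB adj front prev nxt u0).1
            ((levelB adj front prev nxt u0).2.1.map (fun v => (d + 1, v)))
            (levelB adj front prev nxt u0).2.2
            (if front = [] then d0 else d) := by
  intro front
  induction front with
  | nil => intro prev nxt u0 d0 d _ _; simp [levelB]
  | cons node rest ih =>
      intro prev nxt u0 d0 d hlen hfr
      have hnode := hfr node (by simp)
      have hlt : pyidx adj.length node < adj.length :=
        pyidx_lt adj.length node hnode.2.1 hnode.2.2
      have hrow : adj.getD (pyidx adj.length node) [] ∈ adj := by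
        rw [List.getD_eq_getElem _ _ hlt]
        exact List.getElem_mem hlt
      have hrng : ∀ v ∈ adj.getD (pyidx adj.length node) [],
          pyidx prev.length v < prev.length := by
        intro v hv
        have := (HA _ hrow v hv).1
        rw [hlen]
        exact pyidx_lt n.toNat v (by omega) (by omega)
      obtain ⟨h1, h2, h3⟩ := foldB_inv node (adj.getD (pyidx adj.length node) []) prev nxt hrng
      simp only [List.map_cons, List.cons_append, loopA]
      rw [foldA_eq_foldB]
      rw [dif_pos (by simp only [List.length_append, List.length_map]; omega)]
      rw [ih (foldB node (adj.getD (pyidx adj.length node) []) prev nxt).1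
            (foldB node (adj.getD (pyidx adj.length node) []) prev nxt).2 node d d
            (by rw [h2, hlen]) (fun v hv => hfr v (by simp [hv]))]
      simp only [levelB]
      by_cases hrest : rest = [] <;> simp [hrest]

-- accounting for one whole level pass
theorem levelB_inv (adj : List (List Int)) (n : Int)
    (hn : 0 < n)
    (HA : ∀ row ∈ adj, ∀ v ∈ row, (-n ≤ v ∧ v < n) ∧ (-(adj.length : Int) ≤ v ∧ v < adj.length)) :
    ∀ (front : List Int) (prev : List (Option Int)) (nxt : List Int) (u : Int),
      prev.length = n.toNat →
      (∀ v ∈ front, (-n ≤ v ∧ v < n) ∧ (-(adj.length : Int) ≤ v ∧ v < adj.length)) → (∀ v ∈ nxt, (-n ≤ v ∧ v < n) ∧ (-(adj.length : Int) ≤ v ∧ v < adj.length)) →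
      cnPrev (levelB adj front prev nxt u).1 + (levelB adj front prev nxt u).2.1.length
          = cnPrev prev + nxt.length
      ∧ (levelB adj front prev nxt u).1.length = prev.length
      ∧ ∀ v ∈ (levelB adj front prev nxt u).2.1, (-n ≤ v ∧ v < n) ∧ (-(adj.length : Int) ≤ v ∧ v < adj.length) := by
  intro front
  induction front with
  | nil => intro prev nxt u _ _ hn; exact ⟨rfl, rfl, hn⟩
  | cons node rest ih =>
      intro prev nxt u hlen hfr hnxt
      have hnode := hfr node (by simp)
      have hrow : adj.getD (pyidx adj.length node) [] ∈ adj := by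
        have hlt : pyidx adj.length node < adj.length :=
          pyidx_lt adj.length node hnode.2.1 hnode.2.2
        rw [List.getD_eq_getElem _ _ hlt]
        exact List.getElem_mem hlt
      have hrng : ∀ v ∈ adj.getD (pyidx adj.length node) [],
          pyidx prev.length v < prev.length := by
        intro v hv
        have := (HA _ hrow v hv).1
        rw [hlen]
        exact pyidx_lt n.toNat v (by omega) (by omega)
      obtain ⟨h1, h2, h3⟩ := foldB_inv node (adj.getD (pyidx adj.length node) []) prev nxt hrng
      simp only [levelB]
      have hnxt' : ∀ v ∈ (foldB node (adj.getD (pyidx adj.length node) []) prev nxt).2,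
          (-n ≤ v ∧ v < n) ∧ (-(adj.length : Int) ≤ v ∧ v < adj.length) := by
        intro v hv
        rcases h3 v hv with h | h
        · exact hnxt v h
        · exact HA _ hrow v h
      obtain ⟨g1, g2, g3⟩ := ih (foldB node (adj.getD (pyidx adj.length node) []) prev nxt).1
        (foldB node (adj.getD (pyidx adj.length node) []) prev nxt).2 node
        (by rw [h2, hlen]) (fun v hv => hfr v (by simp [hv])) hnxt'
      exact ⟨by omega, by rw [g2, h2], g3⟩

-- the initial u of a level pass over a non-empty frontier does not influence its result
theorem levelB_init_u (adj : List (List Int)) (node : Int) (rest : List Int)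
    (prev : List (Option Int)) (nxt : List Int) (u u' : Int) :
    levelB adj (node :: rest) prev nxt u = levelB adj (node :: rest) prev nxt u' := by
  simp only [levelB]

-- the main correspondence at level boundaries
theorem loopA_eq_loopB (adj : List (List Int)) (n : Int)
    (hn : 0 < n)
    (HA : ∀ row ∈ adj, ∀ v ∈ row, (-n ≤ v ∧ v < n) ∧ (-(adj.length : Int) ≤ v ∧ v < adj.length)) :
    ∀ (k : Nat) (prev : List (Option Int)) (front : List Int) (d u0 d0 uB : Int),
      cnPrev prev = k → front ≠ [] → prev.length = n.toNat →
      (∀ v ∈ front, (-n ≤ v ∧ v < n) ∧ (-(adj.length : Int) ≤ v ∧ v < adj.length)) →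
      loopA adj prev (front.map (fun v => (d, v))) u0 d0 = loopB adj prev front d uB := by
  intro k
  induction k using Nat.strong_induction_on with
  | _ k ih =>
      intro prev front d u0 d0 uB hk hne hlen hfr
      obtain ⟨node, rest, rfl⟩ : ∃ a l, front = a :: l := by
        cases front with
        | nil => exact absurd rfl hne
        | cons a l => exact ⟨a, l, rfl⟩
      have hub : levelB adj (node :: rest) prev [] uB = levelB adj (node :: rest) prev [] u0 :=
        levelB_init_u adj node rest prev [] uB u0
      have hlevel := loopA_level adj n hn HA (node :: rest) prev [] u0 d0 d hlen hfr
      simp only [List.map_nil, List.append_nil] at hlevel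
      obtain ⟨h1, h2, h3⟩ := levelB_inv adj n hn HA (node :: rest) prev [] u0 hlen hfr
        (by simp)
      simp only [List.length_nil, Nat.add_zero] at h1
      rw [hlevel, if_neg (List.cons_ne_nil node rest)]
      conv_rhs => rw [loopB]
      rw [hub]
      by_cases hN : (levelB adj (node :: rest) prev [] u0).2.1 = []
      · rw [dif_neg (by rw [hN] at h1; simp at h1; omega)]
        simp [loopA, hN]
      · have hlt : cnPrev (levelB adj (node :: rest) prev [] u0).1 < cnPrev prev := by
          have : (levelB adj (node :: rest) prev [] u0).2.1.length ≠ 0 := by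
            simpa [List.length_eq_zero_iff] using hN
          omega
        rw [dif_pos hlt, if_neg hN]
        exact ih (cnPrev (levelB adj (node :: rest) prev [] u0).1) (by omega)
          (levelB adj (node :: rest) prev [] u0).1
          (levelB adj (node :: rest) prev [] u0).2.1 (d + 1)
          (levelB adj (node :: rest) prev [] u0).2.2 d
          (levelB adj (node :: rest) prev [] u0).2.2 rfl hN (by rw [h2, hlen]) h3

-- ===== VERDICT (by name: the statement is the Claim_ definition above) =====
theorem bfs_furthest_node_spec : Claim_equal_bfs_furthest_node := by
  intro n adj start _ hpre
  obtain ⟨hn, hs, hsm, hrows⟩ := hpre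
  unfold Spec_bfs_furthest_node bfs_furthest_node bfs_furthest_node_alt
  have hlen : ((List.replicate n.toNat (none : Option Int)).set (pyidx n.toNat start)
      (some start)).length = n.toNat := by simp
  have h1 : [((1 : Int), start)] = [start].map (fun v => ((1 : Int), v)) := by simp
  rw [h1]
  exact loopA_eq_loopB adj n hn hrows (cnPrev _) _ [start] 1 start 1 start rfl
    (by simp) hlen (fun v hv => by simp at hv; subst hv; exact ⟨hs, hsm⟩)
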